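-- pv_equiv track=rewrite | github.com/designi/Python-Udemy-Course | MethodsAndFunctionsTest.py | animal_crackers
-- ===== SOURCE A (Python) =====
-- def animal_crackers(text):
--     temp_list = []
--     text = text.lower()
--     for word in text.split(" "):
--         temp_list.append(word[0])
--     temp_list = list(set(temp_list))
--     if len(temp_list) == 1:
--         return True
--     else:
--         return False
-- ===== SOURCE B (Python) =====
-- def animal_crackers(text):
--     words = text.lower().split(" ")
--     ref = words[0][0]
--     return all(w[0] == ref for w in words)
-- ===== Notes on version B (the rewrite author's own statement) =====
-- stated objective: simpler
-- what changed: Instead of collecting every word's first letter into a list, deduplicating it through a set and testing the set's length, B takes the first word's first letter as a reference and short-circuits an all() comparison of each word's first letter against it, maintaining no container at all.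
import Mathlib
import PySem

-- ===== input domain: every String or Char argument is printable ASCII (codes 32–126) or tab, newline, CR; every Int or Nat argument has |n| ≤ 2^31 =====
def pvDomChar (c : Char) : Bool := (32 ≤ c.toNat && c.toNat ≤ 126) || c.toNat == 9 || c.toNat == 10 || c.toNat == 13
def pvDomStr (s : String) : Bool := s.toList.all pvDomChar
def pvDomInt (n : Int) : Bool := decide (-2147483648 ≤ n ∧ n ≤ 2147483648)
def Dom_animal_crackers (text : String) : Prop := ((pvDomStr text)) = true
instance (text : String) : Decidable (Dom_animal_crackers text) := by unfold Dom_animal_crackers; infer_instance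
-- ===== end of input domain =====

-- B replaces A's set-of-first-letters length test with a short-circuit all() comparison
-- against the first word's first letter (objective: simpler). Pre_ excludes inputs on
-- which A raises IndexError (some space-separated token of the text is empty).


-- ===== PORT A =====
-- split(" "): sep is the nonempty literal " ", so Str.split? is always some; .getD [] is exact
def animal_crackers (text : String) : Bool :=
  let text := PySem.Str.lower text
  let temp_list : List (Option Char) :=
    ((PySem.Str.split? text " ").getD []).foldl (fun acc word => acc ++ [PySem.Str.pyGet? word 0]) []
  let temp_list : PySem.Set (Option Char) := PySem.Set.ofList temp_list
  if temp_list.length = 1 then true else false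

-- ===== PORT B =====
def animal_crackers_alt (text : String) : Bool :=
  let words := (PySem.Str.split? (PySem.Str.lower text) " ").getD []
  match words with
  | [] => false   -- unreachable: split(" ") never yields an empty list
  | w :: _ =>
    match PySem.Str.pyGet? w 0 with
    | none => false   -- IndexError in Python B (outside Pre_)
    | some ref => words.all (fun w' => PySem.Str.pyGet? w' 0 == some ref)

-- ===== PRECONDITION & SPEC =====
-- Pre_ excludes exactly the inputs where A raises IndexError: some space-separated token is empty.
def Pre_animal_crackers (text : String) : Prop :=
  ∀ w ∈ (PySem.Str.split? (PySem.Str.lower text) " ").getD [], w ≠ ""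
instance (text : String) : Decidable (Pre_animal_crackers text) := by
  unfold Pre_animal_crackers; infer_instance
def pvWitness_animal_crackers : String := "Hello heavy hat"
def Spec_animal_crackers (text : String) (out : Bool) : Prop := out = animal_crackers_alt text
instance (text : String) (out : Bool) : Decidable (Spec_animal_crackers text out) := by
  unfold Spec_animal_crackers; infer_instance

-- ===== CLAIM (what is proved, stated in full; the proofs are below) =====
def Claim_equal_animal_crackers : Prop := ∀ (text : String), Dom_animal_crackers text → Pre_animal_crackers text → Spec_animal_crackers text (animal_crackers text)

-- ===== LEMMAS AND PROOFS =====

-- Set.add never shrinks a set; folding it cannot either.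
theorem pv_length_le_foldl_add (xs : List (Option Char)) (s : PySem.Set (Option Char)) :
    s.length ≤ (xs.foldl PySem.Set.add s).length := by
  induction xs generalizing s with
  | nil => simp
  | cons y ys ih =>
    refine le_trans ?_ (ih (PySem.Set.add s y))
    simp only [PySem.Set.add]
    split <;> simp

-- folding Set.add over xs onto the singleton {x} stays a singleton iff every element is x
theorem pv_foldl_add_len1 (xs : List (Option Char)) (x : Option Char) :
    ((xs.foldl PySem.Set.add [x]).length = 1) ↔ (∀ y ∈ xs, y = x) := by
  induction xs with
  | nil => simp
  | cons y ys ih =>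
    by_cases hy : y = x
    · subst hy
      have hadd : PySem.Set.add [y] y = [y] := by
        simp [PySem.Set.add, PySem.Set.contains]
      rw [List.foldl_cons, hadd, ih]
      simp
    · have hadd : PySem.Set.add [x] y = [x, y] := by
        simp [PySem.Set.add, PySem.Set.contains, hy]
      rw [List.foldl_cons, hadd]
      constructor
      · intro h
        exfalso
        have := pv_length_le_foldl_add ys [x, y]
        simp at this
        omega
      · intro h
        exact absurd (h y (by simp)) hy

theorem pv_setlen1 (x : Option Char) (xs : List (Option Char)) :
    ((PySem.Set.ofList (x :: xs)).length = 1) ↔ (∀ y ∈ xs, y = x) := by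
  rw [PySem.Set.ofList_eq_foldl]
  have hadd : PySem.Set.add ([] : PySem.Set (Option Char)) x = [x] := by
    simp [PySem.Set.add, PySem.Set.contains]
  rw [List.foldl_cons, hadd]
  exact pv_foldl_add_len1 xs x

-- ===== VERDICT (by name: the statement is the Claim_ definition above) =====
theorem animal_crackers_spec : Claim_equal_animal_crackers := by
  intro text _ hpre
  unfold Pre_animal_crackers at hpre
  unfold Spec_animal_crackers animal_crackers animal_crackers_alt
  simp only []
  cases hws : (PySem.Str.split? (PySem.Str.lower text) " ").getD [] with
  | nil => simp [PySem.Set.ofList]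
  | cons w ws =>
    rw [hws] at hpre
    have hw : w ≠ "" := hpre w (by simp)
    obtain ⟨r, hr⟩ : ∃ r, PySem.Str.pyGet? w 0 = some r := by
      cases h : PySem.Str.pyGet? w 0 with
      | some r => exact ⟨r, rfl⟩
      | none =>
        exfalso
        have hlen : w.toList ≠ [] := fun hnil => hw (by cases w; simp_all)
        simp only [PySem.Str.pyGet?, PySem.Chars.pyGet?_eq_listPyGet?] at h
        rw [PySem.List.pyGet?_eq_none_iff] at h
        apply h
        simp only [PySem.Raise.InRange]
        have := List.length_pos_of_ne_nil hlen
        omega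
    dsimp only
    rw [hr]
    dsimp only
    rw [PySem.List.foldl_append_singleton_eq_map]
    simp only [List.nil_append, List.map_cons, hr]
    have hif : (if (PySem.Set.ofList (some r :: ws.map (fun word => PySem.Str.pyGet? word 0))).length = 1 then true else false)
          = decide ((PySem.Set.ofList (some r :: ws.map (fun word => PySem.Str.pyGet? word 0))).length = 1) := by
      by_cases h : (PySem.Set.ofList (some r :: ws.map (fun word => PySem.Str.pyGet? word 0))).length = 1 <;> simp only [h, if_true, if_false] <;> tauto
    rw [hif]
    have hr' : PySem.List.pyGet? w.toList 0 = some r := by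
      simpa [PySem.Str.pyGet?, PySem.Chars.pyGet?_eq_listPyGet?] using hr
    rw [Bool.eq_iff_iff]
    simp only [decide_eq_true_eq, List.all_eq_true, beq_iff_eq]
    rw [pv_setlen1]
    · simp [PySem.Str.pyGet?, PySem.Chars.pyGet?_eq_listPyGet?]
      exact fun _ => hr'
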